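-- pv_equiv track=rewrite | github.com/mauwie1/TranscriptClassifier | TextHandler.py | sentenceConverter
-- ===== SOURCE A (Python) =====
-- def sentenceConverter(tuplelist):
--     newlist = []
--     for tuple in tuplelist:
--         sentence = ''
--         words = 0
--         cell = tuple[0].split(' ')
--         counter =0
--         while counter< len(cell):
--             word = cell[counter].lower()
--             sentence+=word+' '
--             words+=1
--             if counter==len(cell)-1:
--                 newlist.append([sentence, tuple[1]])
--                 break
--             if '.' in sentence or '?' in sentence:
--                 newlist.append([sentence, tuple[1]])
--                 sentence=''
--                 words=0
--             counter+=1
--     return newlist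
-- ===== SOURCE B (Python) =====
-- def sentenceConverter(tuplelist):
--     newlist = []
--     for text, label in tuplelist:
--         words = text.split(' ')
--         bounds = [i for i, w in enumerate(words) if '.' in w or '?' in w]
--         if not bounds or bounds[-1] != len(words) - 1:
--             bounds.append(len(words) - 1)
--         start = 0
--         for b in bounds:
--             chunk = words[start:b + 1]
--             newlist.append([' '.join(w.lower() for w in chunk) + ' ', label])
--             start = b + 1
--     return newlist
-- ===== Notes on version B (the rewrite author's own statement) =====
-- stated objective: alternative
-- what changed: A's single fused pass with a running string accumulator and a word counter is replaced by a two-phase pass per tuple: first compute the list of boundary indices (words containing '.' or '?', plus the last index), then slice the word list at those boundaries and join each lowercased chunk.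
import Mathlib
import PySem

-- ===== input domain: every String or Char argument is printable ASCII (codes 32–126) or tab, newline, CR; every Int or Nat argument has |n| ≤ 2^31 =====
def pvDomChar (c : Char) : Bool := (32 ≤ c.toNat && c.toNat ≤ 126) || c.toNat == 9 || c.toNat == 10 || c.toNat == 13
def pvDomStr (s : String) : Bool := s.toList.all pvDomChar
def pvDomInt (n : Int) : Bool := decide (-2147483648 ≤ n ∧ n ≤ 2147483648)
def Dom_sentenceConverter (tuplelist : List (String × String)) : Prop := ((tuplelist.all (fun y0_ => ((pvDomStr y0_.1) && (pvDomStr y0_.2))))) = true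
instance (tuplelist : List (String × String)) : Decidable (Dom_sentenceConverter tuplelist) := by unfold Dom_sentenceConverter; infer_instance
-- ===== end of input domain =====

-- B replaces A's fused running-string accumulator with a two-phase pass per tuple (collect
-- boundary indices of punctuated words, then slice the word list and join each chunk);
-- objective: alternative decomposition, same return value.

-- ===== PORT A =====
-- the while loop of A: counter, sentence and the (dead) word counter are the loop state
def pvLoopA (label : String) (cell : List (List Char)) (counter : Nat)
    (sentence : List Char) (words : Nat) (acc : List (List String)) : List (List String) :=
  if h : counter < cell.length then
    let word := PySem.Chars.lower cell[counter]
    let sentence' := sentence ++ (word ++ [' '])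
    let words' := words + 1
    if counter = cell.length - 1 then
      acc ++ [[String.ofList sentence', label]]
    else if PySem.Chars.isIn ['.'] sentence' || PySem.Chars.isIn ['?'] sentence' then
      pvLoopA label cell (counter + 1) [] 0 (acc ++ [[String.ofList sentence', label]])
    else
      pvLoopA label cell (counter + 1) sentence' words' acc
  else acc
termination_by cell.length - counter

def sentenceConverter (tuplelist : List (String × String)) : List (List String) :=
  tuplelist.foldl
    (fun newlist t => pvLoopA t.2 (PySem.Chars.splitOn t.1.toList [' ']) 0 [] 0 newlist) []

-- ===== PORT B =====
-- one output row: the slice words[start : b+1], lowercased, joined with ' ', plus a trailing ' '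
def pvRenderRow (words : List (List Char)) (label : String) (start b : Int) : List String :=
  [String.ofList (PySem.Chars.join [' ']
      ((PySem.List.slice words (some start) (some (b + 1))).map PySem.Chars.lower) ++ [' ']),
   label]

-- the 'for b in bounds' loop of B, carrying 'start'
def pvWalkB (words : List (List Char)) (label : String) : Int → List Int → List (List String)
  | _, [] => []
  | start, b :: rest => pvRenderRow words label start b :: pvWalkB words label (b + 1) rest

-- boundary indices: words containing '.' or '?', plus the last index unless already there
def pvBoundsB (words : List (List Char)) : List Int :=
  let bs := ((PySem.List.enumerate words).filter
      (fun p => PySem.Chars.isIn ['.'] p.2 || PySem.Chars.isIn ['?'] p.2)).map (·.1)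
  if bs.getLast? = some ((words.length : Int) - 1) then bs
  else bs ++ [(words.length : Int) - 1]

def sentenceConverter_alt (tuplelist : List (String × String)) : List (List String) :=
  tuplelist.foldl
    (fun newlist t =>
      let words := PySem.Chars.splitOn t.1.toList [' ']
      newlist ++ pvWalkB words t.2 0 (pvBoundsB words)) []

-- ===== PRECONDITION & SPEC =====
def Spec_sentenceConverter (tuplelist : List (String × String)) (out : List (List String)) : Prop := out = sentenceConverter_alt tuplelist
instance (tuplelist : List (String × String)) (out : List (List String)) : Decidable (Spec_sentenceConverter tuplelist out) := by unfold Spec_sentenceConverter; infer_instance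

-- ===== CLAIM (what is proved, stated in full; the proofs are below) =====
def Claim_equal_sentenceConverter : Prop := ∀ (tuplelist : List (String × String)), Dom_sentenceConverter tuplelist → Spec_sentenceConverter tuplelist (sentenceConverter tuplelist)

-- ===== LEMMAS AND PROOFS =====

-- the punctuation test shared (inline) by both ports
def pvPunct (w : List Char) : Bool :=
  PySem.Chars.isIn ['.'] w || PySem.Chars.isIn ['?'] w

lemma pvIsIn_single (c : Char) (s : List Char) : PySem.Chars.isIn [c] s = s.contains c := by
  cases h : PySem.Chars.isIn [c] s
  · rw [PySem.Chars.isIn_eq_false_iff, List.singleton_infix_iff] at h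
    simp [List.contains_eq_mem, h]
  · have hm := (PySem.Chars.isIn_iff_infix _ _).mp h
    rw [List.singleton_infix_iff] at hm
    simp [List.contains_eq_mem, hm]

lemma pvPunct_eq (w : List Char) : pvPunct w = (decide ('.' ∈ w) || decide ('?' ∈ w)) := by
  simp [pvPunct, pvIsIn_single, List.contains_eq_mem]

lemma pvPunct_append (a b : List Char) : pvPunct (a ++ b) = (pvPunct a || pvPunct b) := by
  by_cases h1 : '.' ∈ a <;> by_cases h2 : '?' ∈ a <;> by_cases h3 : '.' ∈ b <;>
    by_cases h4 : '?' ∈ b <;> simp [pvPunct_eq, List.mem_append, h1, h2, h3, h4]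

lemma pvPunct_space : pvPunct [' '] = false := by decide

lemma pvLowerChar_punct (c p : Char) (hp : p = '.' ∨ p = '?') :
    PySem.Chars.lowerChar c = p ↔ c = p := by
  unfold PySem.Chars.lowerChar PySem.Chars.isupper
  split_ifs with h
  · simp only [decide_eq_true_eq, Bool.and_eq_true] at h
    obtain ⟨h1, h2⟩ := h
    have hA : 65 ≤ c.toNat := h1
    have hZ : c.toNat ≤ 90 := h2
    have hv : (c.toNat + 32).isValidChar := by constructor; omega
    constructor
    · intro he
      have ht := congrArg Char.toNat he
      rw [Char.toNat_ofNat, if_pos hv] at ht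
      rcases hp with rfl | rfl
      · have : ('.' : Char).toNat = 46 := by decide
        omega
      · have : ('?' : Char).toNat = 63 := by decide
        omega
    · intro he
      exfalso
      subst he
      rcases hp with h' | h'
      · have : ('.' : Char).toNat = 46 := by decide
        rw [h'] at hA; omega
      · have : ('?' : Char).toNat = 63 := by decide
        rw [h'] at hA; omega
  · rfl

lemma pvPunct_lower (w : List Char) : pvPunct (PySem.Chars.lower w) = pvPunct w := by
  have hd : ∀ p : Char, (p = '.' ∨ p = '?') → ((p ∈ PySem.Chars.lower w) ↔ p ∈ w) := by
    intro p hp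
    simp only [PySem.Chars.lower, List.mem_map]
    constructor
    · rintro ⟨a, ha, he⟩
      rwa [(pvLowerChar_punct a p hp).mp he] at ha
    · intro h
      exact ⟨p, h, by rcases hp with rfl | rfl <;> decide⟩
  simp [pvPunct_eq, hd '.' (Or.inl rfl), hd '?' (Or.inr rfl)]

-- splitOn never returns the empty list
lemma pvSplitOn_go_ne_nil (sep : List Char) :
    ∀ (fuel : Nat) (l cur : List Char) (acc : List (List Char)),
      PySem.Chars.splitOn.go sep fuel l cur acc ≠ [] := by
  intro fuel
  induction fuel with
  | zero => intro l cur acc; simp [PySem.Chars.splitOn.go]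
  | succ n ih =>
    intro l cur acc
    cases l with
    | nil => simp [PySem.Chars.splitOn.go]
    | cons c rest =>
      rw [PySem.Chars.splitOn.go]
      split
      · exact ih _ _ _
      · exact ih _ _ _

lemma pvSplitOn_ne_nil (cs sep : List Char) : PySem.Chars.splitOn cs sep ≠ [] := by
  unfold PySem.Chars.splitOn
  exact pvSplitOn_go_ne_nil sep _ cs [] []

-- chunk decomposition of a (nonempty) word list: cut after each punctuated word, always keep the tail chunk
def pvChunks : List (List Char) → List (List (List Char))
  | [] => []
  | w :: rest =>
    if rest = [] then [[w]]
    else if pvPunct w then [w] :: pvChunks rest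
    else
      match pvChunks rest with
      | [] => [[w]]
      | c :: cs => (w :: c) :: cs

lemma pvChunks_ne_nil (ws : List (List Char)) (h : ws ≠ []) : pvChunks ws ≠ [] := by
  cases ws with
  | nil => exact absurd rfl h
  | cons w rest =>
    rw [pvChunks]
    split
    · simp
    · split
      · simp
      · split <;> simp

def pvRenderChunk (c : List (List Char)) : List Char :=
  (c.map (fun w => PySem.Chars.lower w ++ [' '])).flatten

def pvRow (label : String) (c : List (List Char)) : List String :=
  [String.ofList (pvRenderChunk c), label]

-- A's structural loop (over the suffix of cell), with the dead word counter dropped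
def pvLoopA' (label : String) : List (List Char) → List Char → List (List String) → List (List String)
  | [], _, acc => acc
  | w :: rest, sentence, acc =>
    let s' := sentence ++ (PySem.Chars.lower w ++ [' '])
    if rest = [] then acc ++ [[String.ofList s', label]]
    else if pvPunct s' then pvLoopA' label rest [] (acc ++ [[String.ofList s', label]])
    else pvLoopA' label rest s' acc

lemma pvLoopA_eq_loopA' (label : String) (cell : List (List Char)) :
    ∀ (counter : Nat) (sentence : List Char) (words : Nat) (acc : List (List String)),
      pvLoopA label cell counter sentence words acc
        = pvLoopA' label (cell.drop counter) sentence acc := by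
  have H : ∀ (n counter : Nat) (sentence : List Char) (words : Nat) (acc : List (List String)),
      cell.length - counter = n →
      pvLoopA label cell counter sentence words acc
        = pvLoopA' label (cell.drop counter) sentence acc := by
    intro n
    induction n with
    | zero =>
      intro counter s w acc h
      rw [pvLoopA, dif_neg (by omega), List.drop_eq_nil_of_le (by omega), pvLoopA']
    | succ n ih =>
      intro counter s w acc h
      have hc : counter < cell.length := by omega
      rw [pvLoopA, dif_pos hc, List.drop_eq_getElem_cons hc, pvLoopA']
      show (if counter = cell.length - 1 then _ else if PySem.Chars.isIn ['.'] _ || PySem.Chars.isIn ['?'] _ then _ else _) = _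
      by_cases hlast : counter = cell.length - 1
      · have hrest : cell.drop (counter + 1) = [] := List.drop_eq_nil_of_le (by omega)
        rw [if_pos hlast, hrest, if_pos rfl]
      · have hrest : cell.drop (counter + 1) ≠ [] := by
          simp only [ne_eq, List.drop_eq_nil_iff]
          omega
        rw [if_neg hlast, if_neg hrest]
        show (if pvPunct (s ++ (PySem.Chars.lower cell[counter] ++ [' '])) then _ else _) = _
        split
        · exact ih _ _ _ _ (by omega)
        · exact ih _ _ _ _ (by omega)
  exact fun counter s w acc => H _ counter s w acc rfl

lemma pvLoopA'_chunks (label : String) :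
    ∀ (ws : List (List Char)) (sentence : List Char) (acc : List (List String)),
      ws ≠ [] → pvPunct sentence = false →
      pvLoopA' label ws sentence acc
        = acc ++ [String.ofList (sentence ++ pvRenderChunk ((pvChunks ws).headI)), label]
            :: ((pvChunks ws).tail).map (pvRow label) := by
  intro ws
  induction ws with
  | nil => intro s acc h _; exact absurd rfl h
  | cons w rest ih =>
    intro s acc _ hs
    rw [pvLoopA']
    by_cases hr : rest = []
    · subst hr
      rw [if_pos rfl, pvChunks]
      simp [pvRenderChunk]
    · rw [if_neg hr]
      have hs' : pvPunct (s ++ (PySem.Chars.lower w ++ [' '])) = pvPunct w := by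
        rw [pvPunct_append, pvPunct_append, hs, pvPunct_lower, pvPunct_space]
        simp
      by_cases hw : pvPunct w = true
      · rw [if_pos (hs'.trans hw)]
        rw [ih [] _ hr (by decide)]
        have hchunks : pvChunks (w :: rest) = [w] :: pvChunks rest := by
          rw [pvChunks, if_neg hr, if_pos hw]
        obtain ⟨c, cs, hrc⟩ : ∃ c cs, pvChunks rest = c :: cs := by
          cases hx : pvChunks rest with
          | nil => exact absurd hx (pvChunks_ne_nil rest hr)
          | cons c cs => exact ⟨c, cs, rfl⟩
        rw [hchunks, hrc]
        simp [pvRow, pvRenderChunk]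
      · rw [if_neg (by rw [hs']; exact hw)]
        have hsp : pvPunct (s ++ (PySem.Chars.lower w ++ [' '])) = false := by
          rw [hs']; exact Bool.eq_false_iff.mpr hw
        rw [ih _ _ hr hsp]
        obtain ⟨c, cs, hrc⟩ : ∃ c cs, pvChunks rest = c :: cs := by
          cases hx : pvChunks rest with
          | nil => exact absurd hx (pvChunks_ne_nil rest hr)
          | cons c cs => exact ⟨c, cs, rfl⟩
        have hchunks : pvChunks (w :: rest) = (w :: c) :: cs := by
          rw [pvChunks, if_neg hr, if_neg hw, hrc]
        rw [hchunks, hrc]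
        simp [pvRenderChunk]

-- B-side helpers
def pvBs (ws : List (List Char)) (s : Int) : List Int :=
  ((PySem.List.enumerate ws s).filter (fun p => pvPunct p.2)).map (·.1)

lemma pvBs_cons (w : List Char) (rest : List (List Char)) (s : Int) :
    pvBs (w :: rest) s = (if pvPunct w then [s] else []) ++ pvBs rest (s + 1) := by
  by_cases hw : pvPunct w = true <;> simp [pvBs, PySem.List.enumerate_cons, hw]

lemma pvBs_shift (ws : List (List Char)) : ∀ s : Int, pvBs ws (s + 1) = (pvBs ws s).map (· + 1) := by
  induction ws with
  | nil => intro s; simp [pvBs, PySem.List.enumerate_nil]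
  | cons w rest ih =>
    intro s
    rw [pvBs_cons, pvBs_cons, ih (s + 1)]
    by_cases hw : pvPunct w = true <;> simp [hw]

lemma pvBoundsB_eq (ws : List (List Char)) :
    pvBoundsB ws = if (pvBs ws 0).getLast? = some ((ws.length : Int) - 1) then pvBs ws 0
      else pvBs ws 0 ++ [(ws.length : Int) - 1] := by
  rfl

lemma pvBoundsB_ne_nil (ws : List (List Char)) : pvBoundsB ws ≠ [] := by
  rw [pvBoundsB_eq]
  split
  · rename_i hg
    intro hnil
    rw [hnil] at hg
    simp at hg
  · simp

lemma pvBoundsB_nonneg (ws : List (List Char)) (h : ws ≠ []) :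
    ∀ b ∈ pvBoundsB ws, 0 ≤ b := by
  have hbs : ∀ b ∈ pvBs ws 0, 0 ≤ b := by
    intro b hb
    simp only [pvBs, List.mem_map, List.mem_filter] at hb
    obtain ⟨p, ⟨hp, _⟩, rfl⟩ := hb
    rw [PySem.List.mem_enumerate_iff] at hp
    obtain ⟨k, hk, rfl⟩ := hp
    simp
  have hlen : 0 < ws.length := List.length_pos_of_ne_nil h
  intro b hb
  rw [pvBoundsB_eq] at hb
  split at hb
  · exact hbs b hb
  · rcases List.mem_append.mp hb with h' | h'
    · exact hbs b h'
    · simp only [List.mem_singleton] at h'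
      subst h'
      omega

lemma pvBoundsB_cons (w : List Char) (rest : List (List Char)) (h : rest ≠ []) :
    pvBoundsB (w :: rest) = (if pvPunct w then [0] else []) ++ (pvBoundsB rest).map (· + 1) := by
  have hlr : 1 ≤ (rest.length : Int) := by
    have := List.length_pos_of_ne_nil h
    exact_mod_cast this
  have hlen : (((w :: rest).length : Int)) - 1 = (rest.length : Int) := by
    push_cast [List.length_cons]
    ring
  rw [pvBoundsB_eq, pvBoundsB_eq, pvBs_cons, pvBs_shift, hlen]
  rcases hbs : pvBs rest 0 with _ | ⟨x, xs⟩
  · have hW : ¬ ((if pvPunct w then [(0:Int)] else []) ++ ([] : List Int).map (· + 1)).getLast?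
        = some ((rest.length : Int)) := by
      rcases hpw : pvPunct w
      · simp
      · simp
        omega
    rw [if_neg hW,
      if_neg (show ¬ ([] : List Int).getLast? = some ((rest.length : Int) - 1) by simp)]
    have harith : (rest.length : Int) - 1 + 1 = (rest.length : Int) := by ring
    simp [harith]
  · rcases hy : (x :: xs).getLast? with _ | y
    · simp at hy
    · have h1 : (((if pvPunct w then [(0:Int)] else []) ++ ((x :: xs).map (· + 1))).getLast?)
          = some (y + 1) := by
        rw [List.getLast?_append, List.getLast?_map, hy]
        simp
      rw [h1]
      by_cases hc : y = (rest.length : Int) - 1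
      · have c1 : some (y + 1) = some ((rest.length : Int)) := by rw [hc]; congr 1; ring
        have c2 : some y = some ((rest.length : Int) - 1) := by rw [hc]
        rw [if_pos c1, if_pos c2]
      · have c1 : ¬ some (y + 1) = some ((rest.length : Int)) := by
          intro he
          exact hc (by have := Option.some.inj he; omega)
        have c2 : ¬ some y = some ((rest.length : Int) - 1) := by
          intro he
          exact hc (Option.some.inj he)
        rw [if_neg c1, if_neg c2]
        have harith : (rest.length : Int) - 1 + 1 = (rest.length : Int) := by ring
        simp [harith]

lemma pvWalkB_shift (w : List Char) (ws : List (List Char)) (label : String) :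
    ∀ (bounds : List Int) (start : Int), 0 ≤ start → (∀ b ∈ bounds, 0 ≤ b) →
      pvWalkB (w :: ws) label (start + 1) (bounds.map (· + 1)) = pvWalkB ws label start bounds := by
  intro bounds
  induction bounds with
  | nil => intro start _ _; simp [pvWalkB]
  | cons b bs ih =>
    intro start h0 hb
    have hb0 : (0:Int) ≤ b := hb b (by simp)
    have hslice : PySem.List.slice (w :: ws) (some (start + 1)) (some (b + 1 + 1))
        = PySem.List.slice ws (some start) (some (b + 1)) := by
      rw [PySem.List.slice_toNat _ (by omega) (by omega),
        PySem.List.slice_toNat _ (by omega) (by omega)]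
      have h2 : (start + 1).toNat = start.toNat + 1 := by omega
      have h3 : (b + 1 + 1).toNat - (start.toNat + 1) = (b + 1).toNat - start.toNat := by omega
      rw [h2, h3, List.drop_succ_cons]
    have h4 := ih (b + 1) (by omega) (fun x hx => hb x (List.mem_cons_of_mem _ hx))
    simp only [List.map_cons, pvWalkB, pvRenderRow, hslice, h4]

lemma pvWalkB_chunks (label : String) :
    ∀ (ws : List (List Char)), ws ≠ [] →
      pvWalkB ws label 0 (pvBoundsB ws) = (pvChunks ws).map (pvRow label) := by
  intro ws
  induction ws with
  | nil => intro h; exact absurd rfl h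
  | cons w rest ih =>
    intro _
    by_cases hr : rest = []
    · subst hr
      have hb : pvBoundsB [w] = [(0:Int)] := by
        rw [pvBoundsB_eq]
        rcases hpw : pvPunct w <;>
          simp [pvBs, PySem.List.enumerate_cons, PySem.List.enumerate_nil, hpw]
      rw [hb, pvChunks]
      have hslice : PySem.List.slice [w] (some (0:Int)) (some (0 + 1)) = [w] := by
        rw [PySem.List.slice_toNat _ (by omega) (by omega)]
        simp
      rw [pvWalkB, pvWalkB, pvRenderRow, hslice]
      simp [pvRow, pvRenderChunk, PySem.Chars.join_singleton]
    · obtain ⟨c, cs, hrc⟩ : ∃ c cs, pvChunks rest = c :: cs := by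
        cases hx : pvChunks rest with
        | nil => exact absurd hx (pvChunks_ne_nil rest hr)
        | cons c cs => exact ⟨c, cs, rfl⟩
      rcases hbr : pvBoundsB rest with _ | ⟨b, bs'⟩
      · exact absurd hbr (pvBoundsB_ne_nil rest)
      have hbnn : ∀ x ∈ b :: bs', (0:Int) ≤ x := by
        rw [← hbr]; exact pvBoundsB_nonneg rest hr
      have hb0 : (0:Int) ≤ b := hbnn b (by simp)
      have hih := ih hr
      rw [hbr, pvWalkB, hrc, List.map_cons] at hih
      obtain ⟨h5, h6⟩ := List.cons.injEq .. ▸ hih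
      rw [pvBoundsB_cons w rest hr, hbr]
      rcases hpw : pvPunct w
      · -- no punctuation in w: first chunk of rest grows by w
        simp only [Bool.false_eq_true, if_false, List.nil_append, List.map_cons]
        rw [pvWalkB]
        have hsh : pvWalkB (w :: rest) label (b + 1 + 1) (bs'.map (· + 1))
            = pvWalkB rest label (b + 1) bs' :=
          pvWalkB_shift w rest label bs' (b + 1) (by omega)
            (fun x hx => hbnn x (List.mem_cons_of_mem _ hx))
        rw [hsh, h6]
        have hchunks : pvChunks (w :: rest) = (w :: c) :: cs := by
          rw [pvChunks, if_neg hr, if_neg (by simp [hpw]), hrc]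
        rw [hchunks, List.map_cons]
        congr 1
        -- head row: slicing one element further left prepends w to the chunk
        have hts : (b + 1 + 1).toNat = (b + 1).toNat + 1 := by omega
        have hslice : PySem.List.slice (w :: rest) (some 0) (some (b + 1 + 1))
            = w :: PySem.List.slice rest (some 0) (some (b + 1)) := by
          rw [PySem.List.slice_toNat _ (by omega) (by omega),
            PySem.List.slice_toNat _ (by omega) (by omega)]
          simp [hts]
        obtain ⟨r0, rs, hrest⟩ : ∃ r0 rs, PySem.List.slice rest (some 0) (some (b + 1))
            = r0 :: rs := by
          rcases rest with _ | ⟨r0, rs⟩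
          · exact absurd rfl hr
          · refine ⟨r0, List.take b.toNat rs, ?_⟩
            rw [PySem.List.slice_toNat _ (by omega) (by omega)]
            have h7 : (b + 1).toNat = b.toNat + 1 := by omega
            rw [h7]
            simp
        simp only [pvRenderRow, pvRow, List.cons.injEq, and_true, String.ofList_inj] at h5 ⊢
        rw [hslice, hrest, List.map_cons, List.map_cons, PySem.Chars.join_cons_cons]
        rw [hrest, List.map_cons] at h5
        simp only [pvRenderChunk, List.map_cons, List.flatten_cons] at h5 ⊢
        rw [← h5]
        simp [List.append_assoc]
      · -- w is punctuated: it forms its own one-word chunk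
        simp only [if_true, List.map_cons, List.cons_append, List.nil_append]
        rw [pvWalkB]
        have hsh : pvWalkB (w :: rest) label (0 + 1) ((b :: bs').map (· + 1))
            = pvWalkB rest label 0 (b :: bs') :=
          pvWalkB_shift w rest label (b :: bs') 0 (by omega) hbnn
        have hchunks : pvChunks (w :: rest) = [w] :: pvChunks rest := by
          rw [pvChunks, if_neg hr, if_pos hpw]
        rw [List.map_cons] at hsh
        rw [hsh, ← hbr, ih hr, hchunks, List.map_cons]
        congr 1
        have hslice : PySem.List.slice (w :: rest) (some 0) (some (0 + 1)) = [w] := by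
          rw [PySem.List.slice_toNat _ (by omega) (by omega)]
          simp
        rw [pvRenderRow, pvRow, hslice]
        simp [pvRenderChunk, PySem.Chars.join_singleton]

lemma pvPerTuple (label : String) (cell : List (List Char)) (acc : List (List String))
    (h : cell ≠ []) :
    pvLoopA label cell 0 [] 0 acc = acc ++ pvWalkB cell label 0 (pvBoundsB cell) := by
  rw [pvLoopA_eq_loopA', List.drop_zero, pvLoopA'_chunks label cell [] acc h (by decide),
    pvWalkB_chunks label cell h]
  obtain ⟨c, cs, hrc⟩ : ∃ c cs, pvChunks cell = c :: cs := by
    cases hx : pvChunks cell with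
    | nil => exact absurd hx (pvChunks_ne_nil cell h)
    | cons c cs => exact ⟨c, cs, rfl⟩
  rw [hrc]
  simp [pvRow]

-- ===== VERDICT (by name: the statement is the Claim_ definition above) =====
theorem sentenceConverter_spec : Claim_equal_sentenceConverter := by
  intro tuplelist _
  unfold Spec_sentenceConverter sentenceConverter sentenceConverter_alt
  apply PySem.List.foldl_congr_mem
  intro acc t _
  exact pvPerTuple t.2 (PySem.Chars.splitOn t.1.toList [' ']) acc (pvSplitOn_ne_nil _ _)
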